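-- pv_equiv track=rewrite | github.com/unloke/ChessGPT | main.py | calculate_exchange_value
-- ===== SOURCE A (Python) =====
-- def calculate_exchange_value(gains: list) -> int:
--     """
--     修正的極大極小算法計算交換序列的最終價值
--     """
--     if not gains:
--         return 0
--
--     if len(gains) == 1:
--         return gains[0]
--
--     # 從最後開始向前計算
--     # 每一方都會選擇對自己最有利的選項：繼續交換或停止
--     value = gains[-1]
--
--     for i in range(len(gains) - 2, -1, -1):
--         # 當前方選擇：max(停止交換=0, 繼續交換=gains[i]-value)
--         value = max(0, gains[i] - value)
--
--     return value
-- ===== SOURCE B (Python) =====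
-- def _clamp(lo, hi, x):
--     if lo is not None and x < lo:
--         x = lo
--     if hi is not None and x > hi:
--         x = hi
--     return x
--
--
-- def calculate_exchange_value(gains: list) -> int:
--     """Forward pass: compose each step's piecewise-linear map v -> max(0, g - v)
--     into a single clamped affine function clamp(lo, hi, c + s*v), then apply it
--     to the final gain."""
--     if not gains:
--         return 0
--     lo, hi, c, s = None, None, 0, 1  # identity function
--     for g in gains[:-1]:
--         if s == 1:
--             lo, c, s = _clamp(lo, hi, c), c + g, -1
--         else:
--             hi, c, s = _clamp(lo, hi, c), c - g, 1
--     return _clamp(lo, hi, c + s * gains[-1])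
-- ===== Notes on version B (the rewrite author's own statement) =====
-- stated objective: alternative
-- what changed: Instead of A's backward index loop folding max(0, g - value), B makes one forward pass that composes each step's piecewise-linear map v -> max(0, g - v) into a single clamped affine function clamp(lo, hi, c + s*v) and finally applies it to the last gain.
import Mathlib
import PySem

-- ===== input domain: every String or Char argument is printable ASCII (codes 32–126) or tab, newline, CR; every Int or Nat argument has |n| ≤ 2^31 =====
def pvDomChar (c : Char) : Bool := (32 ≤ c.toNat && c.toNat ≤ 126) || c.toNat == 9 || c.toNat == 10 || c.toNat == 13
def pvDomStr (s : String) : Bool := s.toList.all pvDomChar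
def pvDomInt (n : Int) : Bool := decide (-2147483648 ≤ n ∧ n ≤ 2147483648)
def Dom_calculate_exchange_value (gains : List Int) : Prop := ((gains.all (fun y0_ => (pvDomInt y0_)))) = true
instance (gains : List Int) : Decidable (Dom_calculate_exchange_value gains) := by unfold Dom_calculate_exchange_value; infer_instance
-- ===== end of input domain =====

-- B replaces A's backward index loop by a forward pass that composes the per-step maps
-- v ↦ max(0, g - v) into one clamped affine function (objective: alternative); no speed claim.

-- ===== PORT A =====
-- indices 0, -1 and those drawn from the range are always in bounds in the branches where
-- the Python reads them, so pyGetD's default 0 is never used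
def calculate_exchange_value (gains : List Int) : Int :=
  if gains = [] then 0
  else if gains.length = 1 then PySem.List.pyGetD gains 0 0
  else
    (PySem.List.pyRange ((gains.length : Int) - 2) (-1) (-1)).foldl
      (fun value i => max 0 (PySem.List.pyGetD gains i 0 - value))
      (PySem.List.pyGetD gains (-1) 0)

-- ===== PORT B =====
-- _clamp(lo, hi, x) with None meaning "no bound"
def pvClamp (lo hi : Option Int) (x : Int) : Int :=
  let y := match lo with
    | some l => if x < l then l else x
    | none => x
  match hi with
  | some h => if y > h then h else y
  | none => y

def calculate_exchange_value_alt (gains : List Int) : Int :=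
  if gains = [] then 0
  else
    let st := (PySem.List.slice gains none (some (-1))).foldl
      (fun (st : Option Int × Option Int × Int × Int) g =>
        let (lo, hi, c, s) := st
        if s = 1 then (some (pvClamp lo hi c), hi, c + g, -1)
        else (lo, some (pvClamp lo hi c), c - g, 1))
      ((none, none, 0, 1) : Option Int × Option Int × Int × Int)
    pvClamp st.1 st.2.1 (st.2.2.1 + st.2.2.2 * PySem.List.pyGetD gains (-1) 0)

-- ===== PRECONDITION & SPEC =====
def Spec_calculate_exchange_value (gains : List Int) (out : Int) : Prop := out = calculate_exchange_value_alt gains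
instance (gains : List Int) (out : Int) : Decidable (Spec_calculate_exchange_value gains out) := by unfold Spec_calculate_exchange_value; infer_instance

-- ===== CLAIM (what is proved, stated in full; the proofs are below) =====
def Claim_equal_calculate_exchange_value : Prop := ∀ (gains : List Int), Dom_calculate_exchange_value gains → Spec_calculate_exchange_value gains (calculate_exchange_value gains)

-- ===== LEMMAS AND PROOFS =====

-- the common mathematical value: front-to-back minimax
def pvMM : List Int → Int
  | [] => 0
  | [a] => a
  | a :: b :: l => max 0 (a - pvMM (b :: l))

theorem pvMM_cons (a : Int) (l : List Int) (h : l ≠ []) :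
    pvMM (a :: l) = max 0 (a - pvMM l) := by
  cases l with
  | nil => exact absurd rfl h
  | cons b t => rfl

-- composition of the per-step maps over a prefix p: (f_{p0} ∘ … ∘ f_{pk})(v)
def pvApp : List Int → Int → Int
  | [], v => v
  | g :: t, v => max 0 (g - pvApp t v)

theorem pvApp_append (p q : List Int) (v : Int) :
    pvApp (p ++ q) v = pvApp p (pvApp q v) := by
  induction p with
  | nil => rfl
  | cons g t ih => simp [pvApp, ih]

theorem pvMM_eq_app (l : List Int) (h : l ≠ []) :
    pvMM l = pvApp l.dropLast (l.getLast h) := by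
  induction l with
  | nil => exact absurd rfl h
  | cons a t ih =>
    cases t with
    | nil => rfl
    | cons b u =>
      rw [pvMM_cons a (b :: u) (by simp), ih (by simp)]
      simp [pvApp, List.getLast]

-- B's loop step
def pvStep (st : Option Int × Option Int × Int × Int) (g : Int) :
    Option Int × Option Int × Int × Int :=
  let (lo, hi, c, s) := st
  if s = 1 then (some (pvClamp lo hi c), hi, c + g, -1)
  else (lo, some (pvClamp lo hi c), c - g, 1)

-- loop invariant: the state denotes the composed map of the consumed prefix
def pvInv (p : List Int) (st : Option Int × Option Int × Int × Int) : Prop :=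
  (st.2.2.2 = 1 ∨ st.2.2.2 = -1) ∧
  ∀ v, pvClamp st.1 st.2.1 (st.2.2.1 + st.2.2.2 * v) = pvApp p v

theorem pvClamp_step_pos (lo hi : Option Int) (c g v : Int) :
    pvClamp (some (pvClamp lo hi c)) hi (c + g - v) = pvClamp lo hi (c + max 0 (g - v)) := by
  cases lo <;> cases hi <;> simp only [pvClamp] <;> split_ifs <;> omega

theorem pvClamp_step_neg (lo hi : Option Int) (c g v : Int) :
    pvClamp lo (some (pvClamp lo hi c)) (c - g + v) = pvClamp lo hi (c + -max 0 (g - v)) := by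
  cases lo <;> cases hi <;> simp only [pvClamp] <;> split_ifs <;> omega

theorem pvInv_step (p : List Int) (st : Option Int × Option Int × Int × Int) (g : Int)
    (h : pvInv p st) : pvInv (p ++ [g]) (pvStep st g) := by
  obtain ⟨lo, hi, c, s⟩ := st
  obtain ⟨hs, happ⟩ := h
  have happ' : ∀ v, pvApp (p ++ [g]) v = pvClamp lo hi (c + s * max 0 (g - v)) := by
    intro v
    rw [pvApp_append, ← happ]
    rfl
  rcases hs with hs | hs <;> subst hs
  · refine ⟨Or.inr rfl, fun v => ?_⟩
    rw [happ' v]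
    show pvClamp (some (pvClamp lo hi c)) hi (c + g + (-1) * v) =
      pvClamp lo hi (c + 1 * max 0 (g - v))
    have e1 : c + g + (-1 : Int) * v = c + g - v := by ring
    have e2 : c + (1 : Int) * max 0 (g - v) = c + max 0 (g - v) := by ring
    rw [e1, e2, pvClamp_step_pos]
  · refine ⟨Or.inl rfl, fun v => ?_⟩
    rw [happ' v]
    show pvClamp lo (some (pvClamp lo hi c)) (c - g + 1 * v) =
      pvClamp lo hi (c + (-1) * max 0 (g - v))
    have e1 : c - g + (1 : Int) * v = c - g + v := by ring
    have e2 : c + (-1 : Int) * max 0 (g - v) = c + -max 0 (g - v) := by ring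
    rw [e1, e2, pvClamp_step_neg]

theorem pvInv_foldl (p q : List Int) (st : Option Int × Option Int × Int × Int)
    (h : pvInv q st) : pvInv (q ++ p) (p.foldl pvStep st) := by
  induction p generalizing q st with
  | nil => simpa using h
  | cons g t ih =>
    have := ih (q ++ [g]) (pvStep st g) (pvInv_step q st g h)
    simpa using this

theorem alt_eq_pvMM (l : List Int) : calculate_exchange_value_alt l = pvMM l := by
  by_cases h0 : l = []
  · simp [h0, calculate_exchange_value_alt, pvMM]
  · unfold calculate_exchange_value_alt
    simp only [h0, if_false]
    have hstep : ((PySem.List.slice l none (some (-1))).foldl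
        (fun (st : Option Int × Option Int × Int × Int) g =>
          let (lo, hi, c, s) := st
          if s = 1 then (some (pvClamp lo hi c), hi, c + g, -1)
          else (lo, some (pvClamp lo hi c), c - g, 1))
        ((none, none, 0, 1) : Option Int × Option Int × Int × Int)) =
        l.dropLast.foldl pvStep ((none, none, 0, 1)) := by
      rw [PySem.List.slice_to_neg_one]
      rfl
    rw [hstep]
    have hinv : pvInv l.dropLast (l.dropLast.foldl pvStep ((none, none, 0, 1))) := by
      have := pvInv_foldl l.dropLast [] ((none, none, 0, 1))
        ⟨Or.inl rfl, by intro v; simp [pvClamp, pvApp]⟩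
      simpa using this
    have hlast : PySem.List.pyGetD l (-1) 0 = l.getLast h0 :=
      PySem.List.pyGetD_neg_one l 0 h0
    rw [hlast, hinv.2 (l.getLast h0), ← pvMM_eq_app l h0]

-- A's backward loop invariant
theorem pvLoopA (gains : List Int) (j : Nat) (hj : j + 2 ≤ gains.length) :
    (PySem.List.pyRange (j : Int) (-1) (-1)).foldl
      (fun value i => max 0 (PySem.List.pyGetD gains i 0 - value))
      (pvMM (gains.drop (j + 1))) = pvMM gains := by
  induction j with
  | zero =>
    rw [PySem.List.pyRange_neg_one_cons (by norm_num),
        PySem.List.pyRange_neg_one_eq_nil (by norm_num)]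
    simp only [List.foldl_cons, List.foldl_nil, Nat.cast_zero]
    have hget : PySem.List.pyGetD gains (0 : Int) 0 = gains.getD 0 0 :=
      PySem.List.pyGetD_zero gains 0
    have hget2 : gains.getD 0 0 = gains[(0:Nat)]'(by omega) := List.getD_eq_getElem _ _ (by omega)
    have hd : gains.drop 0 = gains[(0:Nat)]'(by omega) :: gains.drop 1 :=
      List.drop_eq_getElem_cons (by omega)
    have hmm : pvMM gains = max 0 (gains[(0:Nat)]'(by omega) - pvMM (gains.drop 1)) := by
      have hd0 : gains = gains[(0:Nat)]'(by omega) :: gains.drop 1 := by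
        simpa using hd
      conv_lhs => rw [hd0]
      rw [pvMM_cons _ _ (by
        intro he
        have := congrArg List.length he
        simp at this
        omega)]
    rw [hget, hget2, hmm]
  | succ j ih =>
    rw [PySem.List.pyRange_neg_one_cons (by exact_mod_cast by omega)]
    simp only [List.foldl_cons]
    have h1 : ((j + 1 : Nat) : Int) - 1 = (j : Int) := by push_cast; ring
    have hget : PySem.List.pyGetD gains ((j + 1 : Nat) : Int) 0 = gains[j + 1]'(by omega) := by
      rw [PySem.List.pyGetD_natCast]
      exact List.getD_eq_getElem _ _ (by omega)
    have hd : gains.drop (j + 1) = gains[j + 1]'(by omega) :: gains.drop (j + 2) :=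
      List.drop_eq_getElem_cons (by omega)
    have hmm : max 0 (gains[j + 1]'(by omega) - pvMM (gains.drop (j + 1 + 1))) =
        pvMM (gains.drop (j + 1)) := by
      rw [hd, pvMM_cons _ _ (by
        intro he
        have := congrArg List.length he
        simp at this
        omega)]
    rw [h1, hget, hmm]
    exact ih (by omega)

theorem a_eq_pvMM (gains : List Int) : calculate_exchange_value gains = pvMM gains := by
  unfold calculate_exchange_value
  by_cases h0 : gains = []
  · simp [h0, pvMM]
  · simp only [h0, if_false]
    by_cases h1 : gains.length = 1
    · obtain ⟨a, t, rfl⟩ := List.exists_cons_of_ne_nil h0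
      have : t = [] := by simpa using h1
      subst this
      simp [pvMM, PySem.List.pyGetD_zero_cons]
    · have hlen : 2 ≤ gains.length := by
        cases gains with
        | nil => exact absurd rfl h0
        | cons a t =>
          cases t with
          | nil => simp at h1
          | cons b u => simp
      simp only [h1, if_false]
      have hlast : PySem.List.pyGetD gains (-1) 0 = pvMM (gains.drop (gains.length - 1)) := by
        rw [PySem.List.pyGetD_neg_one gains 0 h0]
        have hd : gains.drop (gains.length - 1) =
            gains[gains.length - 1]'(by omega) :: gains.drop (gains.length - 1 + 1) :=
          List.drop_eq_getElem_cons (by omega)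
        rw [List.getLast_eq_getElem, hd]
        have : gains.drop (gains.length - 1 + 1) = [] := by
          apply List.drop_eq_nil_of_le
          omega
        rw [this]
        rfl
      have hcast : (gains.length : Int) - 2 = ((gains.length - 2 : Nat) : Int) := by
        push_cast [hlen]
        omega
      rw [hlast, hcast]
      have := pvLoopA gains (gains.length - 2) (by omega)
      have he : gains.length - 2 + 1 = gains.length - 1 := by omega
      rw [he] at this
      exact this

-- ===== VERDICT (by name: the statement is the Claim_ definition above) =====
theorem calculate_exchange_value_spec : Claim_equal_calculate_exchange_value := by
  intro gains _
  unfold Spec_calculate_exchange_value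
  rw [a_eq_pvMM, alt_eq_pvMM]
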